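-- pv_equiv track=rewrite | github.com/JustDimDim12/my_s21_projects | APP1_Bootcamp/AP1_Py_T01.ID_1375362-2/src/exercise3/task3.py | figure_type
-- ===== SOURCE A (Python) =====
-- def figure_type(figure):
--     res = ''
--     x_figure = [i[0] for i in figure]
--     y_figure = [i[1] for i in figure]
--
--     width = max(x_figure) - min(x_figure) + 1
--     height = max(y_figure) - min(y_figure) + 1
--     exp_size = width * height
--     if width == height and exp_size == len(figure):
--         res = 'square'
--     else:
--         res = 'circle'
--     return res
-- ===== SOURCE B (Python) =====
-- def _merge(a, b):
--     return (min(a[0], b[0]), max(a[1], b[1]), min(a[2], b[2]), max(a[3], b[3]))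
--
--
-- def figure_type(figure):
--     # Tournament reduction: turn each point into a 1x1 bounding box and
--     # repeatedly merge adjacent boxes pairwise until one box remains.
--     boxes = [(x, x, y, y) for x, y in figure]
--     while len(boxes) > 1:
--         boxes = [_merge(boxes[i], boxes[i + 1]) if i + 1 < len(boxes) else boxes[i]
--                  for i in range(0, len(boxes), 2)]
--     min_x, max_x, min_y, max_y = boxes[0]
--     w = max_x - min_x + 1
--     h = max_y - min_y + 1
--     return 'square' if w == h and w * h == len(figure) else 'circle'
-- ===== Notes on version B (the rewrite author's own statement) =====
-- stated objective: alternative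
-- what changed: B replaces A's list-projection plus four max/min scans with a tournament reduction: each point becomes a 1x1 bounding box and adjacent boxes are merged pairwise in rounds until one box remains.
import Mathlib
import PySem

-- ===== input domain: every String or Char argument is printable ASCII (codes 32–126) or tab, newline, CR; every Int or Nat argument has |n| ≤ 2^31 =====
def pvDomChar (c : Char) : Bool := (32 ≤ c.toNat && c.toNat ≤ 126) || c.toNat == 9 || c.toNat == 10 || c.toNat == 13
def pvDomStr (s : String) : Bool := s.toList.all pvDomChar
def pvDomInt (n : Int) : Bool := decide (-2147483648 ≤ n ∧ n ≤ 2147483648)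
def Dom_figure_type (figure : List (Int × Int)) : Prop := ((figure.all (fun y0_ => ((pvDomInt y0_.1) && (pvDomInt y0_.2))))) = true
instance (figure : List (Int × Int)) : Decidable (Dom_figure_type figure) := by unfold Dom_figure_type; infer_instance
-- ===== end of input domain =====

-- B classifies by a tournament reduction: each point becomes a 1x1 bounding box and adjacent
-- boxes are merged pairwise in rounds until one box remains, instead of A's list projections
-- plus four separate max/min scans (alternative decomposition, same asymptotic cost).

-- ===== PORT A =====
def figure_type (figure : List (Int × Int)) : String :=
  let x_figure := figure.map (fun i => i.1)
  let y_figure := figure.map (fun i => i.2)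
  match PySem.List.max? x_figure (fun y => y), PySem.List.min? x_figure (fun y => y),
        PySem.List.max? y_figure (fun y => y), PySem.List.min? y_figure (fun y => y) with
  | some mxx, some mnx, some mxy, some mny =>
    let width := mxx - mnx + 1
    let height := mxy - mny + 1
    let exp_size := width * height
    if width == height && exp_size == (figure.length : Int) then "square" else "circle"
  | _, _, _, _ => ""   -- unreachable under Pre_: Python raises ValueError on max([])

-- ===== PORT B =====
-- merge of two bounding boxes (Source B's _merge)
def pvMerge (a b : Int × Int × Int × Int) : Int × Int × Int × Int :=
  (min a.1 b.1, max a.2.1 b.2.1, min a.2.2.1 b.2.2.1, max a.2.2.2 b.2.2.2)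

-- one round of Source B's while loop: merge adjacent boxes pairwise (odd trailing box kept)
def pvPairup : List (Int × Int × Int × Int) → List (Int × Int × Int × Int)
  | a :: b :: t => pvMerge a b :: pvPairup t
  | l => l

lemma pvPairup_length_le (l : List (Int × Int × Int × Int)) : (pvPairup l).length ≤ l.length := by
  induction l using pvPairup.induct with
  | case1 a b t ih => simpa [pvPairup] using Nat.succ_le_succ (Nat.le_succ_of_le ih)
  | case2 l h => simp [pvPairup]

-- Source B's while loop: keep pairing up until at most one box remains
def pvReduce : List (Int × Int × Int × Int) → Option (Int × Int × Int × Int)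
  | [] => none
  | [b] => some b
  | a :: b :: t => pvReduce (pvPairup (a :: b :: t))
termination_by l => l.length
decreasing_by
  simp only [pvPairup, List.length_cons]
  exact Nat.lt_succ_of_le (Nat.succ_le_succ (pvPairup_length_le t))

def figure_type_alt (figure : List (Int × Int)) : String :=
  let boxes := figure.map (fun p => (p.1, p.1, p.2, p.2))
  match pvReduce boxes with
  | none => ""   -- Python B raises IndexError on the empty figure; outside Pre_
  | some (mnx, mxx, mny, mxy) =>
    let w := mxx - mnx + 1
    let h := mxy - mny + 1
    if w == h && w * h == (figure.length : Int) then "square" else "circle"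

-- ===== PRECONDITION & SPEC =====
-- Pre_ excludes the empty figure, on which A raises ValueError (max of empty sequence); B also raises there.
def Pre_figure_type (figure : List (Int × Int)) : Prop := figure ≠ []
instance (figure : List (Int × Int)) : Decidable (Pre_figure_type figure) := by unfold Pre_figure_type; infer_instance
def pvWitness_figure_type : (List (Int × Int)) := [(0, 0)]
def Spec_figure_type (figure : List (Int × Int)) (out : String) : Prop := out = figure_type_alt figure
instance (figure : List (Int × Int)) (out : String) : Decidable (Spec_figure_type figure out) := by unfold Spec_figure_type; infer_instance

-- ===== CLAIM (what is proved, stated in full; the proofs are below) =====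
def Claim_equal_figure_type : Prop := ∀ (figure : List (Int × Int)), Dom_figure_type figure → Pre_figure_type figure → Spec_figure_type figure (figure_type figure)

-- ===== LEMMAS AND PROOFS =====

lemma pvMerge_assoc (a b c : Int × Int × Int × Int) :
    pvMerge (pvMerge a b) c = pvMerge a (pvMerge b c) := by
  simp [pvMerge, min_assoc, max_assoc]

-- one pairing round does not change the merged total
lemma foldl_pvPairup (l : List (Int × Int × Int × Int)) :
    ∀ s, List.foldl pvMerge s (pvPairup l) = List.foldl pvMerge s l := by
  induction l using pvPairup.induct with
  | case1 a b t ih =>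
    intro s
    simp only [pvPairup, List.foldl_cons, ih, ← pvMerge_assoc]
  | case2 l h => intro s; simp [pvPairup]

-- the tournament reduces a nonempty box list to the left fold of pvMerge
lemma pvReduce_eq_foldl : ∀ (h : Int × Int × Int × Int) (t : List (Int × Int × Int × Int)),
    pvReduce (h :: t) = some (List.foldl pvMerge h t) := by
  have main : ∀ l : List (Int × Int × Int × Int), ∀ h t, l = h :: t →
      pvReduce l = some (List.foldl pvMerge h t) := by
    intro l
    induction l using pvReduce.induct with
    | case1 => intro h t hl; cases hl
    | case2 b => intro h t hl; cases hl; simp [pvReduce]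
    | case3 a b t ih =>
      intro h' t' hl
      injection hl with h1 h2
      subst h1; subst h2
      rw [pvReduce]
      rw [ih (pvMerge a b) (pvPairup t) (by simp [pvPairup])]
      rw [foldl_pvPairup]
      simp [List.foldl_cons]
  exact fun h t => main (h :: t) h t rfl

-- folding pvMerge over 1x1 boxes computes the four running extrema
lemma foldl_pvMerge_boxes (rest : List (Int × Int)) :
    ∀ a b c d : Int,
    List.foldl pvMerge (a, b, c, d) (rest.map (fun p => (p.1, p.1, p.2, p.2)))
      = ((rest.map (fun i => i.1)).foldl min a,
         (rest.map (fun i => i.1)).foldl max b,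
         (rest.map (fun i => i.2)).foldl min c,
         (rest.map (fun i => i.2)).foldl max d) := by
  induction rest with
  | nil => intro a b c d; simp
  | cons p t ih =>
    intro a b c d
    simp only [List.map_cons, List.foldl_cons, pvMerge, ih]

-- ===== VERDICT (by name: the statement is the Claim_ definition above) =====
theorem figure_type_spec : Claim_equal_figure_type := by
  intro figure _ hpre
  unfold Spec_figure_type figure_type figure_type_alt
  match figure with
  | [] => exact absurd rfl hpre
  | (x0, y0) :: rest =>
    simp only [List.map_cons, PySem.List.max?_id_cons, PySem.List.min?_id_cons,
      pvReduce_eq_foldl, foldl_pvMerge_boxes]
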